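-- pv_equiv track=rewrite | github.com/khaledidk/Internet-Queries | Compression/IndexWriter.py | Splite_by_alpha
-- ===== SOURCE A (Python) =====
-- def Splite_by_alpha(string_splite):
--     """ this function  split text to words by alphabet and numeric and return it in list"""
--     pos = 0
--     list = []
--
--     while pos < len(string_splite):
--         if string_splite[pos].isalpha() or string_splite[pos].isnumeric():
--
--             pos += 1
--             if (pos == 20):
--                 str = string_splite[:pos]
--                 if str != "":
--                     list.append(str)
--                 string_splite = string_splite[pos :]
--                 pos = 0
--         else:
--             str = string_splite[:pos]
--             if str != "":
--                 list.append(str)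
--             string_splite = string_splite[pos + 1:]
--             pos = 0
--
--     if string_splite != "":
--         list.append(string_splite)
--     return list
-- ===== SOURCE B (Python) =====
-- def Splite_by_alpha(string_splite):
--     """Two-phase: collect maximal alphanumeric runs, then chunk each run to length 20."""
--     runs = []
--     cur = ''
--     for c in string_splite:
--         if c.isalpha() or c.isnumeric():
--             cur += c
--         else:
--             if cur:
--                 runs.append(cur)
--             cur = ''
--     if cur:
--         runs.append(cur)
--     out = []
--     for run in runs:
--         while run:
--             out.append(run[:20])
--             run = run[20:]
--     return out
-- ===== Notes on version B (the rewrite author's own statement) =====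
-- stated objective: simpler
-- what changed: Replaced A's single interleaved index-scan that repeatedly re-slices the shrinking input string by a two-phase decomposition: first collect the maximal alphanumeric runs in one pass, then chunk each run into length-20 slices.
import Mathlib
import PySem

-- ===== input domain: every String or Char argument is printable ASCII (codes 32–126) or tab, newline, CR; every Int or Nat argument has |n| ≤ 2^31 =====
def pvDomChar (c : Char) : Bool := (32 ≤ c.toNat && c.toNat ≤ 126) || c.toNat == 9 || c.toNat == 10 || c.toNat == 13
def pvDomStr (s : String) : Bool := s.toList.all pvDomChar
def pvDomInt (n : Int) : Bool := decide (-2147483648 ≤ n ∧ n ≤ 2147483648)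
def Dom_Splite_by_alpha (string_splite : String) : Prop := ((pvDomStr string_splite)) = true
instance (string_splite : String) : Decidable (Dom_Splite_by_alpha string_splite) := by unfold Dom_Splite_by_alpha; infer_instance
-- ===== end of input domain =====

-- B replaces A's interleaved scan-and-reslice loop by a two-phase runs-then-chunk decomposition (same return value; no side effects).

-- ===== PORT A =====
-- `c.isalpha() or c.isnumeric()`; on the ASCII domain isnumeric coincides with isdigit (exact there).
def pvTok (c : Char) : Bool := PySem.Chars.isalpha c || PySem.Chars.isdigit c

-- A's while-loop; the string is a List Char; slices [:k]/[k:] with 0 ≤ k ≤ length are take/drop (exact there).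
def pvALoop (s : List Char) (pos : Nat) (acc : List String) : List String :=
  if h : pos < s.length then
    if pvTok s[pos] then
      if pos + 1 = 20 then
        pvALoop (s.drop (pos + 1)) 0
          (if s.take (pos + 1) ≠ [] then acc ++ [String.mk (s.take (pos + 1))] else acc)
      else
        pvALoop s (pos + 1) acc
    else
      pvALoop (s.drop (pos + 1)) 0
        (if s.take pos ≠ [] then acc ++ [String.mk (s.take pos)] else acc)
  else
    if s ≠ [] then acc ++ [String.mk s] else acc
termination_by s.length - pos
decreasing_by
  · simp [List.length_drop]; omega
  · omega
  · simp [List.length_drop]; omega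

def Splite_by_alpha (string_splite : String) : List String :=
  pvALoop string_splite.toList 0 []

-- ===== PORT B =====
-- B's inner while-loop: peel 20-character slices off a run.
def pvChunks (l : List Char) : List String :=
  if h : l = [] then [] else String.mk (l.take 20) :: pvChunks (l.drop 20)
termination_by l.length
decreasing_by
  have : l.length ≠ 0 := fun h0 => h (List.eq_nil_of_length_eq_zero h0)
  simp [List.length_drop]; omega

-- B's first pass: one step of the for-loop building (runs, cur).
def pvStep (st : List (List Char) × List Char) (c : Char) : List (List Char) × List Char :=
  if pvTok c then (st.1, st.2 ++ [c])
  else if st.2 ≠ [] then (st.1 ++ [st.2], []) else (st.1, [])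

def Splite_by_alpha_alt (string_splite : String) : List String :=
  let p := string_splite.toList.foldl pvStep ([], [])
  let runs := if p.2 ≠ [] then p.1 ++ [p.2] else p.1
  runs.foldl (fun acc run => acc ++ pvChunks run) []

-- ===== PRECONDITION & SPEC =====
def Spec_Splite_by_alpha (string_splite : String) (out : List String) : Prop := out = Splite_by_alpha_alt string_splite
instance (string_splite : String) (out : List String) : Decidable (Spec_Splite_by_alpha string_splite out) := by unfold Spec_Splite_by_alpha; infer_instance

-- ===== CLAIM (what is proved, stated in full; the proofs are below) =====
def Claim_equal_Splite_by_alpha : Prop := ∀ (string_splite : String), Dom_Splite_by_alpha string_splite → Spec_Splite_by_alpha string_splite (Splite_by_alpha string_splite)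

-- ===== LEMMAS AND PROOFS =====

-- the maximal-runs decomposition, as a recursion (proof-side normal form of B's first pass)
def pvRuns : List Char → List Char → List (List Char)
  | [], cur => if cur ≠ [] then [cur] else []
  | c :: t, cur =>
    if pvTok c then pvRuns t (cur ++ [c])
    else if cur ≠ [] then cur :: pvRuns t [] else pvRuns t []

-- chunk every run (proof-side normal form of B's second pass)
def pvAll (rs : List (List Char)) : List String := (rs.map pvChunks).flatten

lemma pvChunks_nil : pvChunks [] = [] := by rw [pvChunks]; simp

lemma pvAll_nil : pvAll [] = [] := rfl

lemma pvAll_cons (r : List Char) (rs : List (List Char)) :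
    pvAll (r :: rs) = pvChunks r ++ pvAll rs := by simp [pvAll]

lemma pvChunks_short (l : List Char) (hne : l ≠ []) (hlen : l.length ≤ 20) :
    pvChunks l = [String.mk l] := by
  rw [pvChunks, dif_neg hne, List.take_of_length_le hlen, List.drop_eq_nil_of_le hlen,
    pvChunks_nil]

lemma pvStep_foldl (s : List Char) : ∀ (rs : List (List Char)) (cur : List Char),
    (if (s.foldl pvStep (rs, cur)).2 ≠ [] then (s.foldl pvStep (rs, cur)).1 ++ [(s.foldl pvStep (rs, cur)).2]
     else (s.foldl pvStep (rs, cur)).1) = rs ++ pvRuns s cur := by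
  induction s with
  | nil => intro rs cur; by_cases h : cur = [] <;> simp [pvRuns, h]
  | cons c t ih =>
    intro rs cur
    by_cases hc : pvTok c
    · simp [List.foldl_cons, pvStep, hc, pvRuns, ih]
    · by_cases hcur : cur = [] <;>
        simp [List.foldl_cons, pvStep, hc, hcur, pvRuns, ih]

lemma pvChunks_foldl (rs : List (List Char)) : ∀ (acc : List String),
    rs.foldl (fun acc run => acc ++ pvChunks run) acc = acc ++ pvAll rs := by
  induction rs with
  | nil => intro acc; simp [pvAll]
  | cons r t ih => intro acc; simp [List.foldl_cons, ih, pvAll]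

lemma pvAlt_eq (s : String) : Splite_by_alpha_alt s = pvAll (pvRuns s.toList []) := by
  unfold Splite_by_alpha_alt
  rw [pvChunks_foldl]
  simp [pvStep_foldl s.toList [] []]

-- a run whose accumulated prefix already holds ≥ 20 characters splits off its first 20 characters
lemma pvRuns_cut (t : List Char) : ∀ (cur : List Char), 20 ≤ cur.length →
    pvAll (pvRuns t cur) = String.mk (cur.take 20) :: pvAll (pvRuns t (cur.drop 20)) := by
  induction t with
  | nil =>
    intro cur h
    have hne : cur ≠ [] := by intro h0; simp [h0] at h
    rw [pvRuns, if_pos hne]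
    by_cases hd : cur.drop 20 = []
    · rw [pvRuns, if_neg (by simp [hd]), pvAll_cons, pvAll_nil,
        pvChunks, dif_neg hne, hd, pvChunks_nil]
      simp
    · rw [pvRuns, if_pos hd, pvAll_cons, pvAll_nil, pvAll_cons, pvAll_nil,
        pvChunks, dif_neg hne]
      simp
  | cons c t ih =>
    intro cur h
    by_cases hc : pvTok c
    · have h' : 20 ≤ (cur ++ [c]).length := by simp; omega
      rw [pvRuns, if_pos hc, ih _ h', List.take_append_of_le_length (by omega),
        List.drop_append_of_le_length (by omega)]
      rw [pvRuns, if_pos hc]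
    · have hne : cur ≠ [] := by intro h0; simp [h0] at h
      rw [pvRuns, if_neg hc, if_pos hne]
      by_cases hd : cur.drop 20 = []
      · rw [pvRuns, if_neg hc, if_neg (by simp [hd]), pvAll_cons,
          pvChunks, dif_neg hne, hd, pvChunks_nil]
        simp
      · rw [pvRuns, if_neg hc, if_pos hd, pvAll_cons, pvAll_cons,
          pvChunks, dif_neg hne]
        simp

lemma pvALoop_eq (s : List Char) (pos : Nat) (acc : List String)
    (hle : pos ≤ s.length) (hlt : pos < 20) :
    pvALoop s pos acc = acc ++ pvAll (pvRuns (s.drop pos) (s.take pos)) := by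
  fun_induction pvALoop s pos acc with
  | case1 s pos acc h hc hcut ih =>
    -- token char, pos + 1 = 20: cut a 20-chunk
    have ih' := ih (Nat.zero_le _) (by omega)
    simp only [List.drop_zero, List.take_zero, dite_eq_ite] at ih'
    rw [ih']
    have h20 : 20 ≤ s.length := by omega
    have htk : (s.take (pos + 1)).length = 20 := by simp; omega
    have hne : s.take (pos + 1) ≠ [] := by
      intro h0; rw [h0] at htk; simp at htk
    rw [if_pos hne]
    have hdrop : s.drop pos = s[pos] :: s.drop (pos + 1) := List.drop_eq_getElem_cons h
    have hrw : pvRuns (s.drop pos) (s.take pos) = pvRuns (s.drop (pos + 1)) (s.take (pos + 1)) := by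
      rw [hdrop, pvRuns, if_pos hc, List.take_succ, List.getElem?_eq_getElem h]
      simp
    rw [hrw, pvRuns_cut (s.drop (pos + 1)) (s.take (pos + 1)) (by omega),
      show (List.take (pos + 1) s).take 20 = List.take (pos + 1) s from
        List.take_of_length_le (by omega),
      show (List.take (pos + 1) s).drop 20 = [] from List.drop_eq_nil_of_le (by omega)]
    simp
  | case2 s pos acc h hc hcut ih =>
    rw [ih (by omega) (by omega), List.drop_eq_getElem_cons h, pvRuns, if_pos hc,
      List.take_succ, List.getElem?_eq_getElem h]
    simp
  | case3 s pos acc h hc ih =>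
    -- delimiter char: close the current run
    have ih' := ih (Nat.zero_le _) (by omega)
    simp only [List.drop_zero, List.take_zero, dite_eq_ite] at ih'
    rw [ih']
    have hdrop : s.drop pos = s[pos] :: s.drop (pos + 1) := List.drop_eq_getElem_cons h
    rw [hdrop, pvRuns, if_neg hc]
    by_cases hne : s.take pos = []
    · rw [if_neg (by simp [hne]), if_neg (by simp [hne])]
    · rw [if_pos hne, if_pos hne, pvAll_cons,
        pvChunks_short _ hne (by simp; omega)]
      simp
  | case4 s pos acc h hns =>
    -- loop exit, leftover run nonempty
    have hpos : pos = s.length := by omega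
    rw [List.drop_eq_nil_of_le (by omega), List.take_of_length_le (by omega), pvRuns,
      if_pos hns, pvAll_cons, pvAll_nil, pvChunks_short s hns (by omega)]
    simp
  | case5 s pos acc h hns =>
    -- loop exit, nothing left
    have hs : s = [] := not_not.mp hns
    subst hs
    rw [List.drop_nil, List.take_nil, pvRuns]
    simp [pvAll]

-- ===== VERDICT (by name: the statement is the Claim_ definition above) =====
theorem Splite_by_alpha_spec : Claim_equal_Splite_by_alpha := by
  intro s _
  unfold Spec_Splite_by_alpha Splite_by_alpha
  rw [pvAlt_eq, pvALoop_eq s.toList 0 [] (Nat.zero_le _) (by omega)]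
  simp
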